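-- pv_equiv track=rewrite | github.com/sirfoga/pyhal | hal/files/models/system.py | remove_year
-- ===== SOURCE A (Python) =====
-- def remove_year(name):
--     """
--     :param name: string
--         Name to edit
--     :return: string
--         Given string bu with no years.
--     """
--
--     for i in range(len(
--             name) - 3):  # last index is length - 3 - 1 = length - 4
--         if name[i: i + 4].isdigit():
--             name = name[:i] + name[i + 4:]
--             return remove_year(
--                 name)  # if there is a removal, start again
--     return name
-- ===== SOURCE B (Python) =====
-- def remove_year(name):
--     """
--     :param name: string
--         Name to edit
--     :return: string
--         Given string bu with no years.
--     """
--     n = len(name)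
--     pieces = []
--     seg = 0          # start of the pending literal segment
--     i = 0
--     while i < n:
--         if name[i].isdigit():
--             j = i + 1
--             while j < n and name[j].isdigit():
--                 j += 1
--             run = j - i          # maximal digit run name[i:j]
--             if run >= 4:
--                 pieces.append(name[seg:i])
--                 pieces.append(name[j - run % 4:j])   # keep the last run % 4 digits
--                 seg = j
--             i = j
--         else:
--             i += 1
--     pieces.append(name[seg:])
--     return ''.join(pieces)
-- ===== Notes on version B (the rewrite author's own statement) =====
-- stated objective: alternative
-- what changed: Replaces the restart-from-scratch recursive scan-and-splice (rescan from index 0 and recopy the whole string after every removal) with a single left-to-right index sweep that locates each maximal digit run once and keeps only its last len%4 digits, joining the untouched segments at the end.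
import Mathlib
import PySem

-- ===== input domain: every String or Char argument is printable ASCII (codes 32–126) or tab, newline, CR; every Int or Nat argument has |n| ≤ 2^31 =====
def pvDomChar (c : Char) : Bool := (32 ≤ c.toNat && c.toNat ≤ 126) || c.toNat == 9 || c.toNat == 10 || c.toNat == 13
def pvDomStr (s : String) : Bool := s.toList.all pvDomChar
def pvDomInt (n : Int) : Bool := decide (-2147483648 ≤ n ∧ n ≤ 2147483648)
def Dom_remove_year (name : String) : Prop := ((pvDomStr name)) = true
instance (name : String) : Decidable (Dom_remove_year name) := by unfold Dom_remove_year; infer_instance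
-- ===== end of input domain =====

-- B replaces A's restart-from-scratch recursive scan-and-splice by a single index sweep over
-- the maximal digit runs (objective: alternative single-pass algorithm).

-- ===== PORT A =====
-- the `for i in range(len(name) - 3)` loop with its early return: scan i upward, stop at the
-- first i whose 4-char slice is all digits (i < len-3 in Python ↔ i + 4 ≤ length here)
def pvScanA (s : List Char) (i : Nat) : Option Nat :=
  if _h : i + 4 ≤ s.length then
    if PySem.Chars.strIsdigit (PySem.List.slice s (some (i : Int)) (some ((i : Int) + 4))) then
      some i
    else pvScanA s (i + 1)
  else none
termination_by s.length - i

theorem pvScanA_some_le (s : List Char) (i k : Nat) (h : pvScanA s i = some k) :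
    k + 4 ≤ s.length := by
  fun_induction pvScanA s i with
  | case1 i hlt hdig => simp_all
  | case2 i hlt hdig ih => exact ih h
  | case3 i hlt => simp_all

def remove_year_chars (s : List Char) : List Char :=
  match hs : pvScanA s 0 with
  | some i =>
      -- name = name[:i] + name[i+4:]; return remove_year(name)
      remove_year_chars (PySem.List.slice s none (some (i : Int)) ++
                         PySem.List.slice s (some ((i : Int) + 4)) none)
  | none => s
termination_by s.length
decreasing_by
  have hk := pvScanA_some_le s 0 i hs
  have h1 : PySem.List.slice s none (some (i : Int)) = s.take i :=
    PySem.List.slice_to_natCast s i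
  have h2 : PySem.List.slice s (some ((i : Int) + 4)) none = s.drop (i + 4) := by
    have : ((i : Int) + 4) = ((i + 4 : Nat) : Int) := by push_cast; ring
    rw [this]; exact PySem.List.slice_from_natCast s (i + 4)
  simp [h1, h2]
  omega

def remove_year (name : String) : String := String.mk (remove_year_chars name.toList)

-- ===== PORT B =====
-- inner `while j < n and name[j].isdigit(): j += 1`
def pvRunEnd (s : List Char) (j : Nat) : Nat :=
  if h : j < s.length then
    if PySem.Chars.isdigit (s[j]'h) then pvRunEnd s (j + 1) else j
  else j
termination_by s.length - j

-- the fact the outer loop's termination needs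
theorem pvRunEnd_ge (s : List Char) (j : Nat) : j ≤ pvRunEnd s j := by
  fun_induction pvRunEnd s j with
  | case1 j h hd ih => omega
  | case2 j h hd => omega
  | case3 j h => omega

-- outer `while i < n` loop; slices name[a:b] are (drop a).take (b - a) (nonnegative bounds)
def pvLoopB (s : List Char) (seg i : Nat) (pieces : List (List Char)) : List (List Char) :=
  if hi : i < s.length then
    if PySem.Chars.isdigit (s[i]'hi) then
      let j := pvRunEnd s (i + 1)
      let run := j - i
      if 4 ≤ run then
        pvLoopB s j j (pieces ++ [(s.drop seg).take (i - seg),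
                                  (s.drop (j - run % 4)).take (j - (j - run % 4))])
      else pvLoopB s seg j pieces
    else pvLoopB s seg (i + 1) pieces
  else pieces ++ [s.drop seg]
termination_by s.length - i
decreasing_by
  · have h1 := pvRunEnd_ge s (i + 1); omega
  · have h1 := pvRunEnd_ge s (i + 1); omega
  · omega

-- ''.join(pieces) is concatenation
def remove_year_alt (name : String) : String := String.mk (pvLoopB name.toList 0 0 []).flatten

-- ===== PRECONDITION & SPEC =====
def Spec_remove_year (name : String) (out : String) : Prop := out = remove_year_alt name
instance (name : String) (out : String) : Decidable (Spec_remove_year name out) := by unfold Spec_remove_year; infer_instance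

-- ===== CLAIM (what is proved, stated in full; the proofs are below) =====
def Claim_equal_remove_year : Prop := ∀ (name : String), Dom_remove_year name → Spec_remove_year name (remove_year name)

-- ===== LEMMAS AND PROOFS =====

theorem pvRunEnd_le (s : List Char) (j : Nat) (hj : j ≤ s.length) : pvRunEnd s j ≤ s.length := by
  fun_induction pvRunEnd s j with
  | case1 j h hd ih => exact ih (by omega)
  | case2 j h hd => omega
  | case3 j h => omega

-- a 4-char all-digit window of s at position j
def pvWin (s : List Char) (j : Nat) : Prop :=
  j + 4 ≤ s.length ∧ ((s.drop j).take 4).all PySem.Chars.isdigit = true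

-- reference one-pass fold used to relate the two ports: `buf` is the pending digit run
def pvFlushB (buf : List Char) : List Char := buf.drop (buf.length - buf.length % 4)

def pvPassB (out buf : List Char) : List Char → List Char
  | [] => out ++ pvFlushB buf
  | c :: cs =>
      if PySem.Chars.isdigit c then pvPassB out (buf ++ [c]) cs
      else pvPassB (out ++ pvFlushB buf ++ [c]) [] cs

theorem pvDropAppend {α : Type} (l₁ l₂ : List α) (n : Nat) :
    (l₁ ++ l₂).drop (l₁.length + n) = l₂.drop n := by
  rw [List.drop_append, List.drop_eq_nil_of_le (by omega), List.nil_append]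
  congr 1; omega

theorem pvGetLast?_cons {α : Type} (c : α) (cs : List α) (h : cs ≠ []) :
    (c :: cs).getLast? = cs.getLast? := by
  cases cs with
  | nil => exact absurd rfl h
  | cons b l => exact List.getLast?_cons_cons ..

theorem pvPassB_out (out buf rest : List Char) :
    pvPassB out buf rest = out ++ pvPassB [] buf rest := by
  induction rest generalizing out buf with
  | nil => simp [pvPassB]
  | cons c cs ih =>
    by_cases hc : PySem.Chars.isdigit c = true
    · simp only [pvPassB, if_pos hc]
      rw [ih out (buf ++ [c]), ih [] (buf ++ [c])]
    · simp only [pvPassB, if_neg hc]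
      rw [ih (out ++ pvFlushB buf ++ [c]) [], ih ([] ++ pvFlushB buf ++ [c]) []]
      simp

theorem pvFlushB_mod4 (d buf : List Char) (hd : d.length % 4 = 0) :
    pvFlushB (d ++ buf) = pvFlushB buf := by
  unfold pvFlushB
  have h1 : (d ++ buf).length - (d ++ buf).length % 4
      = d.length + (buf.length - buf.length % 4) := by
    simp only [List.length_append]
    omega
  rw [h1, pvDropAppend]

theorem pvPassB_drop_mod4 (rest d buf : List Char) (hd : d.length % 4 = 0) :
    pvPassB [] (d ++ buf) rest = pvPassB [] buf rest := by
  induction rest generalizing buf with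
  | nil => simp [pvPassB, pvFlushB_mod4 d buf hd]
  | cons c cs ih =>
    by_cases hc : PySem.Chars.isdigit c = true
    · simp only [pvPassB, if_pos hc]
      rw [List.append_assoc]
      exact ih (buf ++ [c])
    · simp only [pvPassB, if_neg hc]
      rw [pvFlushB_mod4 d buf hd]

theorem pvPassB_digits (d : List Char) (hd : d.all PySem.Chars.isdigit = true)
    (out buf rest : List Char) :
    pvPassB out buf (d ++ rest) = pvPassB out (buf ++ d) rest := by
  induction d generalizing buf with
  | nil => simp
  | cons c cs ih =>
    simp only [List.all_cons, Bool.and_eq_true] at hd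
    rw [List.cons_append]
    simp only [pvPassB, if_pos hd.1]
    rw [ih hd.2]
    simp

-- removing a 4-digit block at the start of a digit run does not change the fold's output
theorem pvPassB_remove (d t : List Char) (hd : d.all PySem.Chars.isdigit = true)
    (hl : d.length = 4) :
    pvPassB [] [] (d ++ t) = pvPassB [] [] t := by
  rw [pvPassB_digits d hd [] [] t]
  have := pvPassB_drop_mod4 t d [] (by omega)
  simpa using this

-- a prefix ending in a non-digit (or empty, with empty buf) only fixes the state before u/v
theorem pvPassB_prefix (p : List Char) (out buf u v : List Char)
    (hbuf : p = [] → buf = [])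
    (hlast : ∀ c, p.getLast? = some c → PySem.Chars.isdigit c = false)
    (huv : pvPassB [] [] u = pvPassB [] [] v) :
    pvPassB out buf (p ++ u) = pvPassB out buf (p ++ v) := by
  induction p generalizing out buf with
  | nil =>
    rw [hbuf rfl]
    simp only [List.nil_append]
    rw [pvPassB_out out [] u, pvPassB_out out [] v, huv]
  | cons c cs ih =>
    by_cases hc : PySem.Chars.isdigit c = true
    · have hcs : cs ≠ [] := by
        intro h
        subst h
        have := hlast c (by simp)
        simp [this] at hc
      rw [List.cons_append, List.cons_append]
      simp only [pvPassB, if_pos hc]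
      exact ih out (buf ++ [c]) (fun h => absurd h hcs)
        (fun c' h => hlast c' (by rw [pvGetLast?_cons c cs hcs]; exact h))
    · rw [List.cons_append, List.cons_append]
      simp only [pvPassB, if_neg hc]
      by_cases hcs : cs = []
      · subst hcs
        simp only [List.nil_append]
        rw [pvPassB_out _ [] u, pvPassB_out _ [] v, huv]
      · exact ih _ [] (fun h => absurd h hcs)
          (fun c' h => hlast c' (by rw [pvGetLast?_cons c cs hcs]; exact h))

-- if s has no 4-digit window, the fold is the identity
theorem pvPassB_nowin (rest buf out : List Char)
    (hb : buf.all PySem.Chars.isdigit = true)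
    (hnw : ∀ j, ¬ pvWin (buf ++ rest) j) :
    pvPassB out buf rest = out ++ buf ++ rest := by
  induction rest generalizing buf out with
  | nil =>
    have hlen : buf.length < 4 := by
      by_contra h
      apply hnw 0
      refine ⟨by simp; omega, ?_⟩
      simp only [List.drop_zero]
      exact List.all_eq_true.2 fun x hx =>
        List.all_eq_true.1 (by simpa using hb) x (List.take_subset _ _ hx)
    have hf : pvFlushB buf = buf := by
      unfold pvFlushB
      rw [Nat.mod_eq_of_lt hlen]
      simp
    simp [pvPassB, hf]
  | cons c cs ih =>
    have hlen : buf.length < 4 := by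
      by_contra h
      apply hnw 0
      refine ⟨by simp; omega, ?_⟩
      simp only [List.drop_zero]
      rw [show (4 : Nat) = min 4 buf.length by omega, ← List.take_take,
        List.take_append_of_le_length (by omega)]
      exact List.all_eq_true.2 fun x hx =>
        List.all_eq_true.1 hb x (List.take_subset _ _ (by simpa using hx))
    by_cases hc : PySem.Chars.isdigit c = true
    · simp only [pvPassB, if_pos hc]
      have := ih (buf ++ [c]) out (by simp_all) (by simpa using hnw)
      simpa using this
    · simp only [pvPassB, if_neg hc]
      have hf : pvFlushB buf = buf := by
        unfold pvFlushB
        rw [Nat.mod_eq_of_lt hlen]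
        simp
      rw [hf]
      have := ih [] (out ++ buf ++ [c]) (by simp) (by
        intro j hj
        apply hnw (buf.length + (1 + j))
        obtain ⟨h1, h2⟩ := hj
        refine ⟨by simp at h1 ⊢; omega, ?_⟩
        have hdrop : (buf ++ c :: cs).drop (buf.length + (1 + j)) = cs.drop j := by
          rw [pvDropAppend, show 1 + j = j + 1 by omega, List.drop_succ_cons]
        rw [hdrop]
        simpa using h2)
      simpa using this

-- consuming a known no-window segment ending in a non-digit fixes the state before u
theorem pvPassB_seg (mid : List Char) (buf out u : List Char)
    (hb : buf.all PySem.Chars.isdigit = true)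
    (hnw : ∀ j, ¬ pvWin (buf ++ mid) j)
    (hbm : mid = [] → buf = [])
    (hlast : ∀ c, mid.getLast? = some c → PySem.Chars.isdigit c = false) :
    pvPassB out buf (mid ++ u) = out ++ buf ++ mid ++ pvPassB [] [] u := by
  induction mid generalizing buf out with
  | nil =>
    rw [hbm rfl]
    simp only [List.nil_append, List.append_nil]
    rw [pvPassB_out out [] u]
  | cons c cs ih =>
    have hlen : buf.length < 4 := by
      by_contra h
      apply hnw 0
      refine ⟨by simp; omega, ?_⟩
      simp only [List.drop_zero]
      rw [show (4 : Nat) = min 4 buf.length by omega, ← List.take_take,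
        List.take_append_of_le_length (by omega)]
      exact List.all_eq_true.2 fun x hx =>
        List.all_eq_true.1 hb x (List.take_subset _ _ (by simpa using hx))
    by_cases hc : PySem.Chars.isdigit c = true
    · have hcs : cs ≠ [] := by
        intro h
        subst h
        have := hlast c (by simp)
        simp [this] at hc
      rw [List.cons_append]
      simp only [pvPassB, if_pos hc]
      have := ih (buf ++ [c]) out (by simp_all) (by simpa using hnw)
        (fun h => absurd h hcs)
        (fun c' h => hlast c' (by rw [pvGetLast?_cons c cs hcs]; exact h))
      rw [this]
      simp
    · rw [List.cons_append]
      simp only [pvPassB, if_neg hc]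
      have hf : pvFlushB buf = buf := by
        unfold pvFlushB
        rw [Nat.mod_eq_of_lt hlen]
        simp
      rw [hf]
      by_cases hcs : cs = []
      · subst hcs
        simp only [List.nil_append]
        rw [pvPassB_out _ [] u]
      · have := ih [] (out ++ buf ++ [c]) (by simp) (by
          intro j hj
          apply hnw (buf.length + (1 + j))
          obtain ⟨h1, h2⟩ := hj
          refine ⟨by simp at h1 ⊢; omega, ?_⟩
          have hdrop : (buf ++ c :: cs).drop (buf.length + (1 + j)) = cs.drop j := by
            rw [pvDropAppend, show 1 + j = j + 1 by omega, List.drop_succ_cons]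
          rw [hdrop]
          simpa using h2)
          (fun h => absurd h hcs)
          (fun c' h => hlast c' (by rw [pvGetLast?_cons c cs hcs]; exact h))
        rw [this]
        simp
      
-- a pending all-digit run followed by a non-digit (or the end) flushes to its last len%4 chars
theorem pvPassB_run (r u : List Char)
    (hu : ∀ c, u.head? = some c → PySem.Chars.isdigit c = false) :
    pvPassB [] r u = pvFlushB r ++ pvPassB [] [] u := by
  cases u with
  | nil => simp [pvPassB, pvFlushB]
  | cons c cs =>
    have hc : PySem.Chars.isdigit c = false := hu c rfl
    simp only [pvPassB, hc, Bool.false_eq_true, if_false]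
    rw [pvPassB_out, pvPassB_out]
    simp [pvFlushB]
    rw [pvPassB_out [c] [] cs, List.singleton_append]

-- ===== window bookkeeping =====
theorem pvWin_drop (s : List Char) (a k : Nat) : pvWin (s.drop a) k ↔ pvWin s (a + k) := by
  unfold pvWin
  rw [List.drop_drop]
  simp only [List.length_drop]
  constructor
  · rintro ⟨h1, h2⟩; exact ⟨by omega, h2⟩
  · rintro ⟨h1, h2⟩; exact ⟨by omega, h2⟩

theorem pvWin_take (t : List Char) (b k : Nat) : pvWin (t.take b) k ↔ k + 4 ≤ b ∧ pvWin t k := by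
  unfold pvWin
  constructor
  · rintro ⟨h1, h2⟩
    have hb : k + 4 ≤ b ∧ k + 4 ≤ t.length := by simp at h1; omega
    refine ⟨hb.1, hb.2, ?_⟩
    rw [List.drop_take, List.take_take, show min 4 (b - k) = 4 by omega] at h2
    exact h2
  · rintro ⟨hb, h1, h2⟩
    refine ⟨by simp; omega, ?_⟩
    rw [List.drop_take, List.take_take, show min 4 (b - k) = 4 by omega]
    exact h2

theorem pvWin_dig (s : List Char) (k m : Nat) (hw : pvWin s k) (h1 : k ≤ m) (h2 : m < k + 4) :
    ∃ c, s[m]? = some c ∧ PySem.Chars.isdigit c = true := by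
  obtain ⟨hk, hall⟩ := hw
  have hms : m < s.length := by omega
  refine ⟨s[m]'hms, List.getElem?_eq_getElem hms, ?_⟩
  have hidx : m - k < ((s.drop k).take 4).length := by simp; omega
  have hel : ((s.drop k).take 4)[m - k]'hidx = s[m]'hms := by
    rw [List.getElem_take, List.getElem_drop]
    congr 1
    omega
  have := List.all_eq_true.1 hall _ (List.getElem_mem hidx)
  rw [hel] at this
  exact this

theorem pvAllSlice (s : List Char) (a b : Nat)
    (h : ∀ k, a ≤ k → k < b → ∃ c, s[k]? = some c ∧ PySem.Chars.isdigit c = true) :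
    ((s.drop a).take (b - a)).all PySem.Chars.isdigit = true := by
  rw [List.all_eq_true]
  intro x hx
  obtain ⟨m, hm, hget⟩ := List.mem_iff_getElem.1 hx
  have hlen : m < b - a ∧ a + m < s.length := by simp at hm; omega
  obtain ⟨c, hc, hcd⟩ := h (a + m) (by omega) (by omega)
  have hel : ((s.drop a).take (b - a))[m]'hm = s[a + m]'hlen.2 := by
    rw [List.getElem_take, List.getElem_drop]
  rw [List.getElem?_eq_getElem hlen.2] at hc
  injection hc with hc
  rw [← hget, hel, hc]
  exact hcd

theorem pvGetLastSlice (s : List Char) (a b : Nat) (hab : a < b) (hb : b ≤ s.length) :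
    ((s.drop a).take (b - a)).getLast? = s[b - 1]? := by
  rw [List.getLast?_eq_getElem?]
  have hlen : ((s.drop a).take (b - a)).length = b - a := by simp; omega
  rw [hlen, List.getElem?_take_of_lt (by omega), List.getElem?_drop]
  congr 1
  omega

-- ===== pvRunEnd spec =====
theorem pvRunEnd_digits (s : List Char) (j0 : Nat) :
    ∀ k, j0 ≤ k → k < pvRunEnd s j0 → ∃ c, s[k]? = some c ∧ PySem.Chars.isdigit c = true := by
  fun_induction pvRunEnd s j0 with
  | case1 j h hd ih =>
    intro k hk1 hk2
    rcases Nat.eq_or_lt_of_le hk1 with rfl | h'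
    · exact ⟨s[j]'h, List.getElem?_eq_getElem h, hd⟩
    · exact ih k h' hk2
  | case2 j h hd =>
    intro k hk1 hk2
    omega
  | case3 j h =>
    intro k hk1 hk2
    omega

theorem pvRunEnd_stop (s : List Char) (j0 : Nat) :
    ∀ c, s[pvRunEnd s j0]? = some c → PySem.Chars.isdigit c = false := by
  fun_induction pvRunEnd s j0 with
  | case1 j h hd ih => exact ih
  | case2 j h hd =>
    intro c hc
    rw [List.getElem?_eq_getElem h] at hc
    injection hc with hc
    subst hc
    simpa using hd
  | case3 j h =>
    intro c hc
    rw [List.getElem?_eq_none (by omega)] at hc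
    exact absurd hc (by simp)

-- ===== main bridge: the index sweep equals the one-pass fold =====
theorem pvLoopB_eq (s : List Char) (seg i : Nat) (pieces : List (List Char))
    (hsi : seg ≤ i) (hin : i ≤ s.length)
    (hnw : ∀ k, seg ≤ k → k + 4 ≤ i → ¬ pvWin s k)
    (hbd : ∀ c, s[i]? = some c → PySem.Chars.isdigit c = true →
        i = seg ∨ (0 < i ∧ ∀ c', s[i - 1]? = some c' → PySem.Chars.isdigit c' = false)) :
    (pvLoopB s seg i pieces).flatten = pieces.flatten ++ pvPassB [] [] (s.drop seg) := by
  fun_induction pvLoopB s seg i pieces with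
  | case1 seg i pieces hi hdig j run hrun ih =>
    have hrdef : run = j - i := rfl
    have hj1 : i + 1 ≤ j := pvRunEnd_ge s (i + 1)
    have hjn : j ≤ s.length := pvRunEnd_le s (i + 1) (by omega)
    have hstop : ∀ c, (s.drop j).head? = some c → PySem.Chars.isdigit c = false := by
      intro c hc
      rw [List.head?_drop] at hc
      exact pvRunEnd_stop s (i + 1) c hc
    have hIH := ih (le_refl j) hjn (by intro k hk1 hk2 hw; omega) (fun c _ _ => Or.inl rfl)
    -- all of i..j-1 are digits
    have hdig' : ∀ k, i ≤ k → k < j → ∃ c, s[k]? = some c ∧ PySem.Chars.isdigit c = true := by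
      intro k hk1 hk2
      rcases Nat.eq_or_lt_of_le hk1 with rfl | h'
      · exact ⟨s[i]'hi, List.getElem?_eq_getElem hi, hdig⟩
      · exact pvRunEnd_digits s (i + 1) k (by omega) hk2
    have hrall : ((s.drop i).take (j - i)).all PySem.Chars.isdigit = true := pvAllSlice s i j hdig'
    have hsplit1 : s.drop seg = (s.drop seg).take (i - seg) ++ s.drop i := by
      conv_lhs => rw [← List.take_append_drop (i - seg) (s.drop seg)]
      congr 1
      rw [List.drop_drop]
      congr 1
      omega
    have hsplit2 : s.drop i = (s.drop i).take (j - i) ++ s.drop j := by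
      conv_lhs => rw [← List.take_append_drop (j - i) (s.drop i)]
      congr 1
      rw [List.drop_drop]
      congr 1
      omega
    have hkeep : pvFlushB ((s.drop i).take (j - i)) = (s.drop (j - run % 4)).take (j - (j - run % 4)) := by
      unfold pvFlushB
      have hlen : ((s.drop i).take (j - i)).length = j - i := by
        rw [List.length_take, List.length_drop]
        omega
      rw [hlen, List.drop_take, List.drop_drop]
      have e1 : i + ((j - i) - (j - i) % 4) = j - run % 4 := by omega
      have e2 : (j - i) - ((j - i) - (j - i) % 4) = j - (j - run % 4) := by omega
      rw [e1, e2]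
    have hlastmid : ∀ c, ((s.drop seg).take (i - seg)).getLast? = some c → PySem.Chars.isdigit c = false := by
      intro c hc
      by_cases hiseg : i = seg
      · rw [hiseg] at hc; simp at hc
      · rw [pvGetLastSlice s seg i (by omega) (by omega)] at hc
        rcases hbd (s[i]'hi) (List.getElem?_eq_getElem hi) hdig with h | h
        · exact absurd h hiseg
        · exact h.2 c hc
    have hnwmid : ∀ jw, ¬ pvWin ([] ++ (s.drop seg).take (i - seg)) jw := by
      intro jw hw
      rw [List.nil_append, pvWin_take, pvWin_drop] at hw
      exact hnw (seg + jw) (by omega) (by omega) hw.2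
    have hrhs : pvPassB [] [] (s.drop seg)
        = (s.drop seg).take (i - seg) ++ (pvFlushB ((s.drop i).take (j - i)) ++ pvPassB [] [] (s.drop j)) := by
      conv_lhs => rw [hsplit1, hsplit2]
      rw [pvPassB_seg ((s.drop seg).take (i - seg)) [] [] _ (by simp) hnwmid (fun _ => rfl) hlastmid]
      simp only [List.nil_append]
      congr 1
      rw [pvPassB_digits ((s.drop i).take (j - i)) hrall [] [] (s.drop j)]
      simp only [List.nil_append]
      exact pvPassB_run _ _ hstop
    rw [hIH, hrhs, ← hkeep]
    simp
  | case2 seg i pieces hi hdig j run hrun ih =>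
    have hrdef : run = j - i := rfl
    have hj1 : i + 1 ≤ j := pvRunEnd_ge s (i + 1)
    have hjn : j ≤ s.length := pvRunEnd_le s (i + 1) (by omega)
    refine ih (by omega) (by omega) ?_ ?_
    · intro k hk1 hk2 hw
      by_cases hk3 : k + 4 ≤ i
      · exact hnw k hk1 hk3 hw
      · by_cases hki : k < i
        · obtain ⟨c, hc, hcd⟩ := pvWin_dig s k (i - 1) hw (by omega) (by omega)
          rcases hbd (s[i]'hi) (List.getElem?_eq_getElem hi) hdig with h | h
          · omega
          · rw [h.2 c hc] at hcd
            simp at hcd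
        · omega
    · intro c hc hcd
      exfalso
      rw [pvRunEnd_stop s (i + 1) c hc] at hcd
      simp at hcd
  | case3 seg i pieces hi hdig ih =>
    refine ih (by omega) (by omega) ?_ ?_
    · intro k hk1 hk2 hw
      by_cases hk3 : k + 4 ≤ i
      · exact hnw k hk1 hk3 hw
      · obtain ⟨c, hc, hcd⟩ := pvWin_dig s k i hw (by omega) (by omega)
        rw [List.getElem?_eq_getElem hi] at hc
        injection hc with hc
        rw [← hc] at hcd
        exact hdig hcd
    · intro c hc hcd
      refine Or.inr ⟨by omega, ?_⟩
      intro c' hc'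
      rw [show i + 1 - 1 = i by omega, List.getElem?_eq_getElem hi] at hc'
      injection hc' with hc'
      rw [← hc']
      simpa using hdig
  | case4 seg i pieces hi =>
    have hid : pvPassB [] [] (s.drop seg) = s.drop seg := by
      have := pvPassB_nowin (s.drop seg) [] [] (by simp) (by
        intro jw hw
        rw [List.nil_append, pvWin_drop] at hw
        exact hnw (seg + jw) (by omega) (by have h1 := hw.1; omega) hw)
      simpa using this
    rw [hid]
    simp

theorem pvLoopB_eq_root (s : List Char) : (pvLoopB s 0 0 []).flatten = pvPassB [] [] s := by
  have := pvLoopB_eq s 0 0 [] (le_refl 0) (Nat.zero_le _)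
    (fun k hk1 hk2 _ => by omega)
    (fun c _ _ => Or.inl rfl)
  simpa using this

-- ===== A's port equals the fold (strong induction on length) =====
theorem pvScanA_test (s : List Char) (i : Nat) (h : i + 4 ≤ s.length) :
    PySem.Chars.strIsdigit (PySem.List.slice s (some (i : Int)) (some ((i : Int) + 4)))
      = ((s.drop i).take 4).all PySem.Chars.isdigit := by
  have h4 : ((i : Int) + 4) = ((i : Int) + ((4 : Nat) : Int)) := by push_cast; ring
  rw [h4, PySem.List.slice_natCast_add]
  have hlen : ((s.drop i).take 4).length = 4 := by
    simp
    omega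
  have hne : (s.drop i).take 4 ≠ [] := by
    intro hh; rw [hh] at hlen; simp at hlen
  simp [PySem.Chars.strIsdigit, hne]

theorem pvScanA_none (s : List Char) (i : Nat) (h : pvScanA s i = none) :
    ∀ j, i ≤ j → ¬ pvWin s j := by
  fun_induction pvScanA s i with
  | case1 i hlt hdig => simp_all
  | case2 i hlt hdig ih =>
    intro j hij hw
    rcases Nat.eq_or_lt_of_le hij with rfl | hlt'
    · rw [pvScanA_test s i hlt] at hdig
      exact absurd hw.2 (by simp [hdig])
    · exact ih h j hlt' hw
  | case3 i hlt =>
    intro j hij hw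
    exact absurd hw.1 (by omega)

theorem pvScanA_some (s : List Char) (i k : Nat) (h : pvScanA s i = some k) :
    i ≤ k ∧ pvWin s k ∧ ∀ j, i ≤ j → j < k → ¬ pvWin s j := by
  fun_induction pvScanA s i with
  | case1 i hlt hdig =>
    rw [Option.some_inj] at h
    subst h
    rw [pvScanA_test s i hlt] at hdig
    exact ⟨le_refl i, ⟨hlt, hdig⟩, fun j h1 h2 _ => absurd h1 (by omega)⟩
  | case2 i hlt hdig ih =>
    obtain ⟨h1, h2, h3⟩ := ih h
    refine ⟨by omega, h2, fun j hj1 hj2 hw => ?_⟩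
    rcases Nat.eq_or_lt_of_le hj1 with rfl | hlt'
    · rw [pvScanA_test s i hlt] at hdig
      exact absurd hw.2 (by simp [hdig])
    · exact h3 j hlt' hj2 hw
  | case3 i hlt => simp_all

theorem remove_year_chars_eq (s : List Char) :
    remove_year_chars s = pvPassB [] [] s := by
  fun_induction remove_year_chars s with
  | case1 s i hs ih =>
    obtain ⟨-, ⟨hwl, hwd⟩, hfirst⟩ := pvScanA_some s 0 i hs
    have h1 : PySem.List.slice s none (some (i : Int)) = s.take i :=
      PySem.List.slice_to_natCast s i
    have h2 : PySem.List.slice s (some ((i : Int) + 4)) none = s.drop (i + 4) := by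
      have : ((i : Int) + 4) = ((i + 4 : Nat) : Int) := by push_cast; ring
      rw [this]; exact PySem.List.slice_from_natCast s (i + 4)
    rw [ih, h1, h2]
    -- decompose s = take i ++ d ++ drop (i+4), d the 4-digit window
    set d : List Char := (s.drop i).take 4 with hd
    have hsplit : s = s.take i ++ d ++ s.drop (i + 4) := by
      rw [List.append_assoc, hd]
      rw [show s.drop (i + 4) = (s.drop i).drop 4 by rw [List.drop_drop]]
      rw [List.take_append_drop, List.take_append_drop]
    have hdlen : d.length = 4 := by simp [hd]; omega
    -- the char before the window (if any) is not a digit, else an earlier window exists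
    have hlast : ∀ c, (s.take i).getLast? = some c → PySem.Chars.isdigit c = false := by
      intro c hc
      by_contra hcd
      simp only [Bool.not_eq_false] at hcd
      have hi : 0 < i := by
        rcases Nat.eq_zero_or_pos i with rfl | h
        · simp at hc
        · exact h
      apply hfirst (i - 1) (by omega) (by omega)
      refine ⟨by omega, ?_⟩
      -- window at i-1 = c :: first 3 chars of d
      have hdropc : s.drop (i - 1) = c :: s.drop i := by
        have hgl : (s.take i).getLast? = s[i-1]? := by
          rw [List.getLast?_eq_getElem?]
          have hlt : (s.take i).length = i := by simp; omega
          rw [hlt]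
          rw [List.getElem?_take_of_lt (by omega)]
        rw [hgl] at hc
        obtain ⟨hlt, hget⟩ := List.getElem?_eq_some_iff.1 hc
        conv_lhs => rw [List.drop_eq_getElem_cons (by omega)]
        rw [show i - 1 + 1 = i by omega]
        simp [hget]
      rw [hdropc]
      rw [show (c :: s.drop i).take 4 = c :: (s.drop i).take 3 by simp]
      simp only [List.all_cons, Bool.and_eq_true]
      refine ⟨hcd, ?_⟩
      have hsub : (s.drop i).take 3 ⊆ d := by
        rw [hd, show (3 : Nat) = min 3 4 by norm_num, ← List.take_take]
        exact List.take_subset _ _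
      exact List.all_eq_true.2 fun x hx => List.all_eq_true.1 hwd x (hsub hx)
    calc pvPassB [] [] (s.take i ++ s.drop (i + 4))
        = pvPassB [] [] (s.take i ++ (d ++ s.drop (i + 4))) := by
          refine (pvPassB_prefix (s.take i) [] [] (d ++ s.drop (i + 4)) (s.drop (i + 4))
            (fun _ => rfl) hlast ?_).symm
          exact pvPassB_remove d (s.drop (i + 4)) hwd hdlen
      _ = pvPassB [] [] s := by rw [← List.append_assoc, ← hsplit]
  | case2 s hs =>
    have hnw := pvScanA_none s 0 hs
    have := pvPassB_nowin s [] [] (by simp) (by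
      intro j hw
      exact hnw j (Nat.zero_le j) (by simpa using hw))
    simp at this
    exact this.symm

-- ===== VERDICT (by name: the statement is the Claim_ definition above) =====
theorem remove_year_spec : Claim_equal_remove_year := by
  intro name _
  unfold Spec_remove_year remove_year remove_year_alt
  rw [remove_year_chars_eq, ← pvLoopB_eq_root]
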